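-- pv_equiv track=rewrite | github.com/Sangyu-Han/SpecLens | src/autolabel_eval/legacy.py | _coarse_prefix_budgets
-- ===== SOURCE A (Python) =====
-- def _coarse_prefix_budgets(n_patches: int) -> list[int]:
--     n_patches = int(n_patches)
--     if n_patches <= 1:
--         return [max(n_patches, 1)]
--
--     budgets: list[int] = []
--     current = 1
--     while True:
--         budgets.append(int(current))
--         if current >= n_patches:
--             break
--         current = min(n_patches, current * 2)
--     return budgets
-- ===== SOURCE B (Python) =====
-- def _coarse_prefix_budgets(n_patches: int) -> list[int]:
--     n_patches = int(n_patches)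
--     if n_patches <= 1:
--         return [max(n_patches, 1)]
--     budgets = [1 << i for i in range(n_patches.bit_length()) if (1 << i) < n_patches]
--     budgets.append(n_patches)
--     return budgets
-- ===== Notes on version B (the rewrite author's own statement) =====
-- stated objective: simpler
-- what changed: Replaces the unbounded while-loop that doubles a running value and caps it with min each iteration by a closed-form construction: the number of needed powers of two is read off n.bit_length(), the powers are generated from their exponents in one comprehension, and n is appended once.
import Mathlib
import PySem

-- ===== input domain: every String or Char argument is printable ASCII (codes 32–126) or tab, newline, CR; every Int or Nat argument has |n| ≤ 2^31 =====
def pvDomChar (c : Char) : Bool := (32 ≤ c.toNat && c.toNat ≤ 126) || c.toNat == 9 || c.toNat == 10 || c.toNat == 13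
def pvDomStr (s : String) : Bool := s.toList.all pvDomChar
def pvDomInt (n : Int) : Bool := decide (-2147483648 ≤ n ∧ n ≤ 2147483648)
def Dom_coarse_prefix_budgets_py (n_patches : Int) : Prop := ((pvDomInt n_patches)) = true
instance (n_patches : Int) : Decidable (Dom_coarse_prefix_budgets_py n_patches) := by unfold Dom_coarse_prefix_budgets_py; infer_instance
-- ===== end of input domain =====

-- B replaces A's doubling while-loop (cap by min each step) with a closed-form list of powers of two
-- generated from exponents below n.bit_length(), plus one appended n: simpler, no running loop state.


-- ===== PORT A =====
-- A's `while True` loop, as structural recursion on a fuel argument that only makes the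
-- recursion total; the entry supplies fuel n_patches.toNat, which exceeds the iteration
-- count (proved in pvLoopA_eq / fuel_enough below), so the fuel-exhausted branch is unreachable.
def pvLoopA : Nat → Int → Int → List Int → List Int
  | 0, _, current, budgets => budgets ++ [current]
  | fuel + 1, n, current, budgets =>
    if n ≤ current then budgets ++ [current]
    else pvLoopA fuel n (min n (current * 2)) (budgets ++ [current])

def coarse_prefix_budgets_py (n_patches : Int) : List Int :=
  if n_patches ≤ 1 then [max n_patches 1]
  else pvLoopA n_patches.toNat n_patches 1 []

-- ===== PORT B =====
def coarse_prefix_budgets_py_alt (n_patches : Int) : List Int :=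
  if n_patches ≤ 1 then [max n_patches 1]
  else
    (((List.range (PySem.Int.bitLength n_patches)).filter
        (fun i => (2 : Int) ^ i < n_patches)).map (fun i => (2 : Int) ^ i)) ++ [n_patches]

-- ===== PRECONDITION & SPEC =====
def Spec_coarse_prefix_budgets_py (n_patches : Int) (out : List Int) : Prop := out = coarse_prefix_budgets_py_alt n_patches
instance (n_patches : Int) (out : List Int) : Decidable (Spec_coarse_prefix_budgets_py n_patches out) := by unfold Spec_coarse_prefix_budgets_py; infer_instance

-- ===== CLAIM (what is proved, stated in full; the proofs are below) =====
def Claim_equal_coarse_prefix_budgets_py : Prop := ∀ (n_patches : Int), Dom_coarse_prefix_budgets_py n_patches → Spec_coarse_prefix_budgets_py n_patches (coarse_prefix_budgets_py n_patches)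

-- ===== LEMMAS AND PROOFS =====

-- exponent cutoff: the powers of two below n are exactly 2^i for i < bitLength (n-1)
lemma pow_lt_iff_lt_bitLength (n : Int) (hn : 2 ≤ n) (i : Nat) :
    (2 : Int) ^ i < n ↔ i < PySem.Int.bitLength (n - 1) := by
  have ht : (n - 1).natAbs = (n - 1).toNat := by omega
  have h1 : (n - 1).toNat < 2 ^ PySem.Int.bitLength (n - 1) := by
    have := PySem.Int.lt_two_pow_bitLength (n - 1); omega
  have h2 : 2 ^ (PySem.Int.bitLength (n - 1) - 1) ≤ (n - 1).toNat := by
    have := PySem.Int.two_pow_bitLength_le (n - 1) (by omega); omega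
  have hb1 : (n - 1 : Int) < 2 ^ PySem.Int.bitLength (n - 1) := by
    have : ((n - 1).toNat : Int) < ((2 ^ PySem.Int.bitLength (n - 1) : ℕ) : Int) :=
      by exact_mod_cast h1
    push_cast at this
    omega
  have hb2 : (2 : Int) ^ (PySem.Int.bitLength (n - 1) - 1) ≤ n - 1 := by
    have : ((2 ^ (PySem.Int.bitLength (n - 1) - 1) : ℕ) : Int) ≤ ((n - 1).toNat : Int) :=
      by exact_mod_cast h2
    push_cast at this
    omega
  constructor
  · intro h
    by_contra hle
    have hmono : (2 : Int) ^ PySem.Int.bitLength (n - 1) ≤ 2 ^ i :=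
      pow_le_pow_right₀ (by norm_num) (Nat.le_of_not_lt hle)
    omega
  · intro h
    have hmono : (2 : Int) ^ i ≤ 2 ^ (PySem.Int.bitLength (n - 1) - 1) :=
      pow_le_pow_right₀ (by norm_num) (by omega)
    omega

lemma bitLength_sub_one_le (n : Int) (hn : 2 ≤ n) :
    PySem.Int.bitLength (n - 1) ≤ PySem.Int.bitLength n := by
  by_contra h
  have h := Nat.lt_of_not_le h
  have h1 : (2 : Int) ^ PySem.Int.bitLength n < n :=
    (pow_lt_iff_lt_bitLength n hn _).2 h
  have h2 : n.natAbs < 2 ^ PySem.Int.bitLength n := PySem.Int.lt_two_pow_bitLength n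
  have h3 : (n : Int) < 2 ^ PySem.Int.bitLength n := by
    have hcast : ((2 ^ PySem.Int.bitLength n : ℕ) : Int) = 2 ^ PySem.Int.bitLength n := by
      push_cast; norm_num
    have h2' : n.toNat < 2 ^ PySem.Int.bitLength n := by omega
    have h3' : ((n.toNat : ℕ) : Int) < ((2 ^ PySem.Int.bitLength n : ℕ) : Int) := by
      exact_mod_cast h2'
    rw [hcast] at h3'
    omega
  omega

-- a monotone cutoff turns filter-of-range into a shorter range
lemma filter_range_eq_range {p : Nat → Bool} {m : Nat} :
    ∀ s, m ≤ s → (∀ i, p i = decide (i < m)) → (List.range s).filter p = List.range m := by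
  intro s
  induction s with
  | zero => intro hm _; simp_all
  | succ s ih =>
    intro hm hp
    rw [List.range_succ, List.filter_append]
    by_cases hms : m ≤ s
    · rw [ih hms hp]
      have : p s = false := by rw [hp]; simp; omega
      simp [this]
    · have hm' : m = s + 1 := by omega
      subst hm'
      have hps : p s = true := by rw [hp]; simp
      have hfs : (List.range s).filter p = List.range s := by
        apply List.filter_eq_self.mpr
        intro a ha
        rw [hp]
        simp only [List.mem_range] at ha
        simp
        omega
      rw [hfs]
      simp [hps, ← List.range_succ]

-- the loop, entered at current = 2^k ≤ n with enough fuel, produces the remaining powers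
-- of two below n and then n
lemma pvLoopA_eq (n : Int) (hn : 2 ≤ n) :
    ∀ (j k : Nat) (b : List Int) (fuel : Nat),
      PySem.Int.bitLength (n - 1) ≤ k + j → PySem.Int.bitLength (n - 1) - k + 1 ≤ fuel →
      (2 : Int) ^ k ≤ n →
      pvLoopA fuel n ((2 : Int) ^ k) b =
        b ++ (List.range' k (PySem.Int.bitLength (n - 1) - k)).map (fun i => (2 : Int) ^ i) ++ [n] := by
  intro j
  induction j with
  | zero =>
    intro k b fuel hbl hfuel hkn
    have hnk : ¬ (2 : Int) ^ k < n := fun h =>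
      absurd ((pow_lt_iff_lt_bitLength n hn k).1 h) (by omega)
    have heq : (2 : Int) ^ k = n := by omega
    have hz : PySem.Int.bitLength (n - 1) - k = 0 := by omega
    match fuel with
    | 0 => omega
    | f + 1 =>
      rw [heq, hz, pvLoopA]
      simp
  | succ j ih =>
    intro k b fuel hbl hfuel hkn
    by_cases hk : PySem.Int.bitLength (n - 1) ≤ k
    · exact ih k b fuel (by omega) hfuel hkn
    · have hk := Nat.lt_of_not_le hk
      have hlt : (2 : Int) ^ k < n := (pow_lt_iff_lt_bitLength n hn k).2 hk
      have hpos : (1 : Int) ≤ 2 ^ k := one_le_pow₀ (by norm_num)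
      match fuel with
      | 0 => omega
      | f + 1 =>
        rw [pvLoopA]
        have h2 : ¬ n ≤ (2 : Int) ^ k := by omega
        simp only [h2, if_false]
        have hdouble : (2 : Int) ^ k * 2 = 2 ^ (k + 1) := by ring
        have hsplit : List.range' k (PySem.Int.bitLength (n - 1) - k) =
            k :: List.range' (k + 1) (PySem.Int.bitLength (n - 1) - (k + 1)) := by
          have : PySem.Int.bitLength (n - 1) - k = (PySem.Int.bitLength (n - 1) - (k + 1)) + 1 := by
            omega
          rw [this, List.range'_succ]
        by_cases hcap : (2 : Int) ^ (k + 1) ≤ n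
        · have hmin : min n ((2 : Int) ^ k * 2) = 2 ^ (k + 1) := by
            rw [hdouble]; exact min_eq_right hcap
          rw [hmin, ih (k + 1) (b ++ [(2 : Int) ^ k]) f (by omega) (by omega) hcap, hsplit]
          simp
        · have hmin : min n ((2 : Int) ^ k * 2) = n := by
            rw [hdouble]; exact min_eq_left (by omega)
          have hbl1 : PySem.Int.bitLength (n - 1) = k + 1 := by
            have : ¬ (k + 1 < PySem.Int.bitLength (n - 1)) := fun h =>
              absurd ((pow_lt_iff_lt_bitLength n hn (k + 1)).2 h) (by omega)
            omega
          match f, (by omega : 1 ≤ f) with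
          | f' + 1, _ =>
            rw [hmin, pvLoopA]
            have h4 : n ≤ n := le_refl n
            simp only [h4, if_true, hbl1, hsplit]
            simp

-- the fuel supplied at the entry call covers every iteration: bitLength (n-1) + 1 ≤ n.toNat
lemma fuel_enough (n : Int) (hn : 2 ≤ n) : PySem.Int.bitLength (n - 1) - 0 + 1 ≤ n.toNat := by
  have h2 : 2 ^ (PySem.Int.bitLength (n - 1) - 1) ≤ (n - 1).toNat := by
    have h := PySem.Int.two_pow_bitLength_le (n - 1) (by omega)
    omega
  have h3 : PySem.Int.bitLength (n - 1) - 1 < 2 ^ (PySem.Int.bitLength (n - 1) - 1) :=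
    Nat.lt_two_pow_self
  omega

-- ===== VERDICT (by name: the statement is the Claim_ definition above) =====
theorem coarse_prefix_budgets_py_spec : Claim_equal_coarse_prefix_budgets_py := by
  intro n _
  unfold Spec_coarse_prefix_budgets_py coarse_prefix_budgets_py coarse_prefix_budgets_py_alt
  by_cases hn : n ≤ 1
  · simp [hn]
  · have hn2 : 2 ≤ n := by omega
    simp only [if_neg (by omega : ¬ n ≤ 1)]
    have hfilter : (List.range (PySem.Int.bitLength n)).filter (fun i => decide ((2 : Int) ^ i < n))
        = List.range (PySem.Int.bitLength (n - 1)) := by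
      apply filter_range_eq_range (PySem.Int.bitLength n) (bitLength_sub_one_le n hn2)
      intro i
      simp [pow_lt_iff_lt_bitLength n hn2 i]
    have h1 : (1 : Int) = 2 ^ (0 : Nat) := by norm_num
    rw [h1, pvLoopA_eq n hn2 (PySem.Int.bitLength (n - 1)) 0 [] n.toNat (by omega)
          (fuel_enough n hn2) (by norm_num; omega)]
    rw [hfilter, List.range_eq_range']
    simp
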